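-- pv_equiv track=rewrite | github.com/elshadaghazade/crash_course_tasks | Group3/18-Polindromic-Integer/solved.py | find_nonlitcher_numbers
-- ===== SOURCE A (Python) =====
-- def find_nonlitcher_numbers(number1, number2):
--     """Finds count of nonlitcher numbers between number1 and number2 (inclusive)"""
--     def is_non_litcher(number, step=1):
--         number = str(number)
--
--         if step >= 60:
--             return False
--         elif number != number[::-1]:
--             return is_non_litcher(int(number) + int(number[::-1]), step + 1)
--         else:
--             return True
--
--     cnt = 0
--
--     for number in range(number1, number2+1):
--         if is_non_litcher(number):
--             cnt += 1
--
--     return cnt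
-- ===== SOURCE B (Python) =====
-- def _reaches_palindrome(n):
--     """Iterative reverse-and-add: does n hit a palindrome within 59 checks?"""
--     for _ in range(59):
--         s = str(n)
--         r = s[::-1]
--         if s == r:
--             return True
--         n = int(s) + int(r)
--     return False
--
--
-- def find_nonlitcher_numbers(number1, number2):
--     """Finds count of nonlitcher numbers between number1 and number2 (inclusive)"""
--     return sum(1 for n in range(number1, number2 + 1) if _reaches_palindrome(n))
-- ===== Notes on version B (the rewrite author's own statement) =====
-- stated objective: simpler
-- what changed: The recursive reverse-and-add helper with a step counter becomes a flat iterative for-loop over a fixed 59-iteration budget, and the outer counting loop with an accumulator becomes a sum over a filtered generator.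
import Mathlib
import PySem

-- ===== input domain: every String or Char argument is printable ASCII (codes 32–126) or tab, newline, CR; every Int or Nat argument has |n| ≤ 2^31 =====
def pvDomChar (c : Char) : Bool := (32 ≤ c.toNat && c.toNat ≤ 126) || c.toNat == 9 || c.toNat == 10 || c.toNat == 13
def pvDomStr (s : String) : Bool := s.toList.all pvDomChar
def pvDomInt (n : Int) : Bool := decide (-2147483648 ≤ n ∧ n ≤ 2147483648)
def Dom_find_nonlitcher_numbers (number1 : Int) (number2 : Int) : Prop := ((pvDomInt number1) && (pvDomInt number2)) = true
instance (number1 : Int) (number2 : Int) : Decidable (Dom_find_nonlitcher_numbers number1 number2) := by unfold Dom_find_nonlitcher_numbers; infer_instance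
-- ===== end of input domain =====

-- B rewrites the recursive reverse-and-add helper as a flat bounded for-loop and counts
-- via a filtered sum instead of an accumulator (objective: simpler).

-- ===== PORT A =====
-- int(s) for the digit strings arising inside Pre_ (ofChars? is some there);
-- the getD 0 default is only reached outside Pre_, where Python raises ValueError.
def pvIntOf (cs : List Char) : Int := (PySem.Int.ofChars? cs).getD 0

-- A's recursive helper is_non_litcher(number, step); recursion measured by 60 - step.
def pvIsNonLitcher (number : Int) (step : Int) : Bool :=
  let s := PySem.Int.toChars number
  if step ≥ 60 then false
  else if s ≠ s.reverse then pvIsNonLitcher (pvIntOf s + pvIntOf s.reverse) (step + 1)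
  else true
termination_by (60 - step).toNat
decreasing_by omega

def find_nonlitcher_numbers (number1 : Int) (number2 : Int) : Int :=
  (PySem.List.pyRange number1 (number2 + 1) 1).foldl
    (fun cnt number => if pvIsNonLitcher number 1 then cnt + 1 else cnt) 0

-- ===== PORT B =====
-- B's helper: for _ in range(59): check palindrome / reverse-add; structural on the budget.
def pvReaches : Int → Nat → Bool
  | _, 0 => false
  | n, fuel + 1 =>
    let s := PySem.Int.toChars n
    let r := s.reverse
    if s = r then true
    else pvReaches (pvIntOf s + pvIntOf r) fuel

def find_nonlitcher_numbers_alt (number1 : Int) (number2 : Int) : Int :=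
  ((PySem.List.pyRange number1 (number2 + 1) 1).filter (fun n => pvReaches n 59)).length

-- ===== PRECONDITION & SPEC =====
-- Pre_ excludes ranges containing a negative number: there Python's int(str(n)[::-1])
-- raises ValueError (e.g. int('3-')) in both A and B.
def Pre_find_nonlitcher_numbers (number1 : Int) (number2 : Int) : Prop :=
  number2 < number1 ∨ 0 ≤ number1
instance (number1 : Int) (number2 : Int) : Decidable (Pre_find_nonlitcher_numbers number1 number2) := by
  unfold Pre_find_nonlitcher_numbers; infer_instance

def pvWitness_find_nonlitcher_numbers : Int × Int := (5, 30)

def Spec_find_nonlitcher_numbers (number1 : Int) (number2 : Int) (out : Int) : Prop :=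
  out = find_nonlitcher_numbers_alt number1 number2
instance (number1 : Int) (number2 : Int) (out : Int) : Decidable (Spec_find_nonlitcher_numbers number1 number2 out) := by
  unfold Spec_find_nonlitcher_numbers; infer_instance

-- ===== CLAIM (what is proved, stated in full; the proofs are below) =====
def Claim_equal_find_nonlitcher_numbers : Prop := ∀ (number1 : Int) (number2 : Int), Dom_find_nonlitcher_numbers number1 number2 → Pre_find_nonlitcher_numbers number1 number2 → Spec_find_nonlitcher_numbers number1 number2 (find_nonlitcher_numbers number1 number2)

-- ===== LEMMAS AND PROOFS =====
-- A's recursion at step = 60 - fuel equals B's fuel-counting loop.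
theorem pvIsNonLitcher_eq_pvReaches (fuel : Nat) : ∀ (n : Int),
    pvIsNonLitcher n (60 - (fuel : Int)) = pvReaches n fuel := by
  induction fuel with
  | zero =>
    intro n
    rw [pvIsNonLitcher]
    norm_num [pvReaches]
  | succ k ih =>
    intro n
    rw [pvIsNonLitcher]
    have h1 : ¬ (60 - ((k : Int) + 1) ≥ 60) := by
      have : (0:Int) ≤ (k : Int) := Int.natCast_nonneg k
      omega
    push_cast
    push_cast at h1
    simp only [h1, if_false, pvReaches]
    by_cases hp : PySem.Int.toChars n = (PySem.Int.toChars n).reverse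
    · rw [if_neg (not_not_intro hp), if_pos hp]
    · simp only [hp, if_false, ne_eq, not_false_eq_true, if_true]
      have : (60 : Int) - (↑k + 1) + 1 = 60 - ↑k := by ring
      rw [this]
      exact ih _

theorem pvIsNonLitcher_one (n : Int) : pvIsNonLitcher n 1 = pvReaches n 59 := by
  have := pvIsNonLitcher_eq_pvReaches 59 n
  norm_num at this
  exact this

-- counting fold = length of filter
theorem pvFoldCount (p : Int → Bool) (l : List Int) : ∀ (c : Int),
    l.foldl (fun cnt n => if p n then cnt + 1 else cnt) c = c + ((l.filter p).length : Int) := by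
  induction l with
  | nil => intro c; simp
  | cons x xs ih =>
    intro c
    by_cases hx : p x
    · simp only [List.foldl_cons, List.filter_cons, hx, if_true, ih]
      push_cast [List.length_cons]
      omega
    · simp only [List.foldl_cons, List.filter_cons, hx, if_false, ih, Bool.false_eq_true]

-- ===== VERDICT (by name: the statement is the Claim_ definition above) =====
theorem find_nonlitcher_numbers_spec : Claim_equal_find_nonlitcher_numbers := by
  intro number1 number2 _ _
  unfold Spec_find_nonlitcher_numbers find_nonlitcher_numbers find_nonlitcher_numbers_alt
  have h : (fun (cnt : Int) (number : Int) => if pvIsNonLitcher number 1 then cnt + 1 else cnt)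
       = (fun (cnt : Int) (n : Int) => if pvReaches n 59 then cnt + 1 else cnt) := by
    funext cnt n; rw [pvIsNonLitcher_one]
  rw [h, pvFoldCount (fun n => pvReaches n 59)]
  simp
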